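-- pv_equiv track=rewrite | github.com/samuelbraun04/Instrumentator | SamplePackGenerator.py | get_diatonic_notes_midi
-- ===== SOURCE A (Python) =====
-- def get_diatonic_notes_midi(chord_notes_midi, key, key_type):
--     # Map the key to its MIDI number (assuming octave 4 for simplicity)
--     key_midi = note_to_midi(key)
--
--     # Define the scale intervals for major and minor keys
--
--     major_intervals = [2, 2, 1, 2, 2, 2, 1]
--     minor_intervals = [2, 1, 2, 2, 1, 2, 2]
--
--     # Choose the correct intervals based on the key type
--     intervals = major_intervals if key_type == 'major' else minor_intervals
--
--     # Generate the scale for the key in MIDI numbers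
--     scale_midi = [key_midi]
--     current_note = key_midi
--     for interval in intervals:
--         current_note += interval
--         if current_note > 83:
--             current_note-=12
--         scale_midi.append(current_note)
--
--     scale_midi = [item for item in scale_midi if item not in chord_notes_midi]
--
--     # Since we're asked for the key's diatonic notes, we return the scale MIDI numbers
--     return scale_midi
--
-- def note_to_midi(note):
--
--     note_semitone = {
--         'C': 72, 'C#': 73, 'Db': 73, 'D': 74, 'D#': 75, 'Eb': 75, 'E': 76, 'F': 77,
--         'F#': 78, 'Gb': 78, 'G': 79, 'G#': 80, 'Ab': 80, 'A': 81, 'A#': 82, 'Bb': 82, 'B': 83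
--     }
--
--     return note_semitone[note]
-- ===== SOURCE B (Python) =====
-- def get_diatonic_notes_midi(chord_notes_midi, key, key_type):
--     key_midi = note_to_midi(key)
--     intervals = [2, 2, 1, 2, 2, 2, 1] if key_type == 'major' else [2, 1, 2, 2, 1, 2, 2]
--     # prefix sums of the intervals (0 for the root itself), folded into the
--     # octave 72..83 by a closed-form modulo instead of a mutating accumulator
--     offsets = [sum(intervals[:i]) for i in range(len(intervals) + 1)]
--     scale_midi = [(key_midi + off - 72) % 12 + 72 for off in offsets]
--     return [n for n in scale_midi if n not in chord_notes_midi]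
--
--
-- def note_to_midi(note):
--     note_semitone = {
--         'C': 72, 'C#': 73, 'Db': 73, 'D': 74, 'D#': 75, 'Eb': 75, 'E': 76, 'F': 77,
--         'F#': 78, 'Gb': 78, 'G': 79, 'G#': 80, 'Ab': 80, 'A': 81, 'A#': 82, 'Bb': 82, 'B': 83
--     }
--     return note_semitone[note]
-- ===== Notes on version B (the rewrite author's own statement) =====
-- stated objective: simpler
-- what changed: Replaces the mutating accumulator with the branch-based octave wrap (current -= 12 when > 83) by prefix sums of the interval list mapped through the closed-form octave fold (key_midi + offset - 72) % 12 + 72.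
import Mathlib
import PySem

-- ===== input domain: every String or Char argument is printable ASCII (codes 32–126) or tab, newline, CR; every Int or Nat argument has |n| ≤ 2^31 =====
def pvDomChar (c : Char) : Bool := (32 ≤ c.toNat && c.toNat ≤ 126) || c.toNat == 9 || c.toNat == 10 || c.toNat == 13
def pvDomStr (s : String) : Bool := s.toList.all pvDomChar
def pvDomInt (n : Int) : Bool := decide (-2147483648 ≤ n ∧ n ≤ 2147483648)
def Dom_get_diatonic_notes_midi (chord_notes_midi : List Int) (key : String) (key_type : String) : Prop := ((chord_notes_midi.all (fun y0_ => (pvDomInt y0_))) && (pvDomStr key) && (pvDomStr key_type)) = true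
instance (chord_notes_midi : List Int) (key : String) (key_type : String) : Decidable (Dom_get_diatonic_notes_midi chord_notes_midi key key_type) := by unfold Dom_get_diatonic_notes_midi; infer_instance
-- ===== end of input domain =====

-- B replaces A's mutating accumulator (branch wrap 'current -= 12 when > 83') by prefix sums
-- of the interval list mapped through the closed-form octave fold (key_midi + off - 72) % 12 + 72.

-- ===== PORT A =====
-- note_semitone dict of note_to_midi; lookup returns none exactly where Python raises KeyError
def pvNoteSemitone : PySem.Dict String Int := PySem.Dict.mk
  [("C", 72), ("C#", 73), ("Db", 73), ("D", 74), ("D#", 75), ("Eb", 75), ("E", 76), ("F", 77),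
   ("F#", 78), ("Gb", 78), ("G", 79), ("G#", 80), ("Ab", 80), ("A", 81), ("A#", 82), ("Bb", 82), ("B", 83)]

def note_to_midi (note : String) : Option Int := PySem.Dict.get? pvNoteSemitone note

def get_diatonic_notes_midi (chord_notes_midi : List Int) (key : String) (key_type : String) : List Int :=
  match note_to_midi key with
  | none => []  -- Python raises KeyError here; excluded by Pre_
  | some key_midi =>
    let major_intervals : List Int := [2, 2, 1, 2, 2, 2, 1]
    let minor_intervals : List Int := [2, 1, 2, 2, 1, 2, 2]
    let intervals := if key_type == "major" then major_intervals else minor_intervals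
    let st := intervals.foldl (fun (p : List Int × Int) interval =>
        let c0 := p.2 + interval
        let c := if c0 > 83 then c0 - 12 else c0
        (p.1 ++ [c], c)) ([key_midi], key_midi)
    st.1.filter (fun item => !(chord_notes_midi.contains item))

-- ===== PORT B =====
def get_diatonic_notes_midi_alt (chord_notes_midi : List Int) (key : String) (key_type : String) : List Int :=
  match note_to_midi key with
  | none => []  -- KeyError in Python; excluded by Pre_
  | some key_midi =>
    let intervals : List Int := if key_type == "major" then [2, 2, 1, 2, 2, 2, 1] else [2, 1, 2, 2, 1, 2, 2]
    let offsets := (List.range (intervals.length + 1)).map (fun i => (intervals.take i).sum)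
    let scale_midi := offsets.map (fun off => PySem.Int.mod (key_midi + off - 72) 12 + 72)
    scale_midi.filter (fun n => !(chord_notes_midi.contains n))

-- ===== PRECONDITION & SPEC =====
-- Pre_ excludes exactly the keys not present in note_semitone, on which A raises KeyError (B raises too).
def Pre_get_diatonic_notes_midi (chord_notes_midi : List Int) (key : String) (key_type : String) : Prop :=
  key ∈ ["C", "C#", "Db", "D", "D#", "Eb", "E", "F", "F#", "Gb", "G", "G#", "Ab", "A", "A#", "Bb", "B"]
instance (chord_notes_midi : List Int) (key : String) (key_type : String) : Decidable (Pre_get_diatonic_notes_midi chord_notes_midi key key_type) := by unfold Pre_get_diatonic_notes_midi; infer_instance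

def pvWitness_get_diatonic_notes_midi : List Int × String × String := ([72, 76, 79], "C", "major")

def Spec_get_diatonic_notes_midi (chord_notes_midi : List Int) (key : String) (key_type : String) (out : List Int) : Prop := out = get_diatonic_notes_midi_alt chord_notes_midi key key_type
instance (chord_notes_midi : List Int) (key : String) (key_type : String) (out : List Int) : Decidable (Spec_get_diatonic_notes_midi chord_notes_midi key key_type out) := by unfold Spec_get_diatonic_notes_midi; infer_instance

-- ===== CLAIM (what is proved, stated in full; the proofs are below) =====
def Claim_equal_get_diatonic_notes_midi : Prop := ∀ (chord_notes_midi : List Int) (key : String) (key_type : String), Dom_get_diatonic_notes_midi chord_notes_midi key key_type → Pre_get_diatonic_notes_midi chord_notes_midi key key_type → Spec_get_diatonic_notes_midi chord_notes_midi key key_type (get_diatonic_notes_midi chord_notes_midi key key_type)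

-- ===== LEMMAS AND PROOFS =====

-- For each of the 17 valid keys the two unfiltered scale lists coincide (per the key_type branch),
-- hence the filtered results coincide.
theorem pv_scale_eq (key : String) (hkey : Pre_get_diatonic_notes_midi [] key "")
    (chord_notes_midi : List Int) (key_type : String) :
    get_diatonic_notes_midi chord_notes_midi key key_type
      = get_diatonic_notes_midi_alt chord_notes_midi key key_type := by
  simp only [Pre_get_diatonic_notes_midi, List.mem_cons, List.not_mem_nil, or_false] at hkey
  by_cases hkt : (key_type == "major") = true <;>
  · rcases hkey with rfl|rfl|rfl|rfl|rfl|rfl|rfl|rfl|rfl|rfl|rfl|rfl|rfl|rfl|rfl|rfl|rfl <;>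
    simp only [get_diatonic_notes_midi, get_diatonic_notes_midi_alt, hkt, if_true, if_false,
      Bool.false_eq_true] <;>
    simp [note_to_midi, pvNoteSemitone, PySem.Dict.get?_mk_cons, List.foldl,
      List.range, List.range.loop, List.map, List.take, List.sum, PySem.Int.mod, Int.fmod]

-- ===== VERDICT (by name: the statement is the Claim_ definition above) =====
theorem get_diatonic_notes_midi_spec : Claim_equal_get_diatonic_notes_midi := by
  intro chord_notes_midi key key_type _ hpre
  exact pv_scale_eq key hpre chord_notes_midi key_type
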